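-- pv_equiv track=rewrite | github.com/MrBrantCode/unitest_baseline | mut_generate/mist_train_cf/cf_57808/solution.py | custom_sort_reverse
-- ===== SOURCE A (Python) =====
-- def custom_sort_reverse(lst):
--   try:
--     assert type(lst) == list # Check if input is a list
--     for sublist in lst:
--       assert type(sublist) == list  # Check if all elements in list are lists
--       for element in sublist:
--         assert type(element) == str  # Check if each sublist only contains strings
--
--     # Start Operations
--     # Operation 1 and 2
--     sorted_lst = [sorted(list(set(sublist))) for sublist in lst]
--
--     # Operation 3 and 4
--     result = []
--     for sublist in sorted_lst:
--       for element in sublist: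
--         if element not in result:
--           result.append(element)
--
--     # Reverse the list
--     for i in range(len(result)//2):
--       result[i], result[-i-1] = result[-i-1], result[i]
--
--     return result
--
--   # Error Handling
--   except AssertionError:
--     return "Input error: ensure all elements are lists of strings."
--   except Exception as e:
--     return str(e)
-- ===== SOURCE B (Python) =====
-- def custom_sort_reverse(lst):
--   try:
--     assert type(lst) == list
--     for sublist in lst:
--       assert type(sublist) == list
--       for element in sublist:
--         assert type(element) == str
--
--     # Record each element's first-occurrence position in the concatenated
--     # stream of per-sublist sorted uniques (setdefault keeps the first one),
--     # then sort the unique elements by that position, descending.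
--     order = {}
--     pos = 0
--     for sublist in lst:
--       for element in sorted(set(sublist)):
--         order.setdefault(element, pos)
--         pos += 1
--     return sorted(order, key=order.get, reverse=True)
--
--   except AssertionError:
--     return "Input error: ensure all elements are lists of strings."
--   except Exception as e:
--     return str(e)
-- ===== Notes on version B (the rewrite author's own statement) =====
-- stated objective: faster
-- what changed: Replaces A's global dedup by linear membership scans of the growing result list plus a separate in-place swap-reversal loop with a dict recording each element's first-occurrence position (setdefault) followed by a single descending sort of the keys by that position.
import Mathlib
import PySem

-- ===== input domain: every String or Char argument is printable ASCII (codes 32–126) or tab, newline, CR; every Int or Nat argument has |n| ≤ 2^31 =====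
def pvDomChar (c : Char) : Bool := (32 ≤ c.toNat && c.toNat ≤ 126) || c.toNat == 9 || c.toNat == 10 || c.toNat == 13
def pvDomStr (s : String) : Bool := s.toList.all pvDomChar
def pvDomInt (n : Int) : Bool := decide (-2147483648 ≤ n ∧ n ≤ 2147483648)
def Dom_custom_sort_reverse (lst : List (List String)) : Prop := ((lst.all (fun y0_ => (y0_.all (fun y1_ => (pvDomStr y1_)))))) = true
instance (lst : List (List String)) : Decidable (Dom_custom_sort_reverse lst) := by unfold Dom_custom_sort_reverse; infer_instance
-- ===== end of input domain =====

-- B replaces A's append-with-membership-scan dedup plus an explicit in-place swap-reversal loop by a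
-- first-occurrence-position dict (setdefault) followed by one descending sort of the keys by position.


-- ===== PORT A =====
-- sorted(list(set(sublist))) — appears verbatim in both Pythons
def pySortedSet (sublist : List String) : List String :=
  PySem.List.sorted (PySem.Set.ofList sublist) (fun x => x) false

-- one iteration of A's reverse loop: result[i], result[-i-1] = result[-i-1], result[i]
-- (indices are always in range here, so the total forms pyGetD/pySetD are exact)
def pySwapStep (r : List String) (i : Int) : List String :=
  PySem.List.pySetD (PySem.List.pySetD r i (PySem.List.pyGetD r (-i-1) "")) (-i-1)
    (PySem.List.pyGetD r i "")

-- On List (List String) inputs all three assertions of A hold, so only the main path is ported.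
def custom_sort_reverse (lst : List (List String)) : List String :=
  let sorted_lst := lst.map (fun sublist => pySortedSet sublist)
  let result := sorted_lst.foldl
    (fun result sublist => sublist.foldl
      (fun result element => if element ∈ result then result else result ++ [element]) result) []
  (PySem.List.pyRange 0 (PySem.Int.floordiv (result.length : Int) 2) 1).foldl pySwapStep result

-- ===== PORT B =====
-- order.setdefault(element, pos); pos += 1 — the state is the dict together with the running position
def custom_sort_reverse_alt (lst : List (List String)) : List String :=
  let st := lst.foldl
    (fun (st : PySem.Dict String Int × Int) sublist =>
      (pySortedSet sublist).foldl
        (fun st element => (PySem.Dict.setdefault st.1 element st.2, st.2 + 1)) st)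
    (PySem.Dict.empty, 0)
  -- sorted(order, key=order.get, reverse=True): every key is present, so .get = getD with any default
  PySem.List.sorted (PySem.Dict.keys st.1) (fun k => PySem.Dict.getD st.1 k 0) true

-- ===== PRECONDITION & SPEC =====
def Spec_custom_sort_reverse (lst : List (List String)) (out : List String) : Prop := out = custom_sort_reverse_alt lst
instance (lst : List (List String)) (out : List String) : Decidable (Spec_custom_sort_reverse lst out) := by unfold Spec_custom_sort_reverse; infer_instance

-- ===== CLAIM =====
def Claim_equal_custom_sort_reverse : Prop := ∀ (lst : List (List String)), Dom_custom_sort_reverse lst → Spec_custom_sort_reverse lst (custom_sort_reverse lst)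

-- ===== LEMMAS AND PROOFS =====

-- Python l[-k-1] for k < len(l)
theorem pyGetD_neg (l : List String) (k : Nat) (hk : k < l.length) (d : String) :
    PySem.List.pyGetD l (-(k:Int)-1) d = l.getD (l.length - 1 - k) d := by
  simp only [PySem.List.pyGetD, PySem.List.pyGet?, PySem.List.pyIdx?]
  rw [if_neg (by omega), if_pos (by omega : -(l.length:Int) ≤ -↑k - 1)]
  have h1 : l.length - (-(-(k:Int) - 1)).toNat = l.length - 1 - k := by omega
  rw [h1]
  simp [List.getD_eq_getElem?_getD]

-- Python l[-k-1] = v for k < len(l)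
theorem pySetD_neg (l : List String) (k : Nat) (hk : k < l.length) (v : String) :
    PySem.List.pySetD l (-(k:Int)-1) v = l.set (l.length - 1 - k) v := by
  simp only [PySem.List.pySetD, PySem.List.pySet?, PySem.List.pyIdx?]
  rw [if_neg (by omega), if_pos (by omega : -(l.length:Int) ≤ -↑k - 1)]
  have h1 : l.length - (-(-(k:Int) - 1)).toNat = l.length - 1 - k := by omega
  rw [h1]
  simp

-- the invariant of A's in-place reverse loop, after k of the len//2 iterations
theorem swap_partial (r : List String) (k : Nat) (hk : k ≤ r.length / 2) :
    ((PySem.List.pyRange 0 (k:Int) 1).foldl pySwapStep r).length = r.length ∧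
    ∀ j, j < r.length →
      ((PySem.List.pyRange 0 (k:Int) 1).foldl pySwapStep r)[j]? =
        if j < k ∨ r.length - k ≤ j then r[r.length - 1 - j]? else r[j]? := by
  induction k with
  | zero =>
    simp only [Nat.cast_zero]
    rw [PySem.List.pyRange_one_eq_nil (le_refl 0)]
    refine ⟨rfl, ?_⟩
    intro j hj
    rw [if_neg (by omega)]
    rfl
  | succ k ih =>
    obtain ⟨hlen, hget⟩ := ih (by omega)
    set l := (PySem.List.pyRange 0 (k:Int) 1).foldl pySwapStep r with hl
    have hrange : PySem.List.pyRange 0 ((k+1:Nat):Int) 1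
        = PySem.List.pyRange 0 (k:Int) 1 ++ [(k:Int)] := by
      push_cast
      exact PySem.List.pyRange_one_succ_right (by omega)
    rw [hrange, List.foldl_append]
    simp only [List.foldl_cons, List.foldl_nil, ← hl]
    have hkn : k < r.length := by omega
    have hkl : k < l.length := by omega
    have hm : r.length - 1 - k < r.length := by omega
    -- the two reads: positions k and len-1-k are still untouched after k swaps
    have hlk : l[k]? = r[k]? := by rw [hget k hkn, if_neg (by omega)]
    have hlm : l[r.length - 1 - k]? = r[r.length - 1 - k]? := by
      rw [hget _ hm, if_neg (by omega)]
    have hb : l.getD k "" = r[k] := by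
      rw [List.getD_eq_getElem?_getD, hlk, List.getElem?_eq_getElem hkn, Option.getD_some]
    have ha : l.getD (r.length - 1 - k) "" = r[r.length - 1 - k] := by
      rw [List.getD_eq_getElem?_getD, hlm, List.getElem?_eq_getElem hm, Option.getD_some]
    -- compute the swap step on l
    have hswap : pySwapStep l (k:Int) =
        (l.set k r[r.length - 1 - k]).set (r.length - 1 - k) r[k] := by
      unfold pySwapStep
      rw [show -(k:Int) - 1 = -((k:Nat):Int) - 1 from rfl]
      rw [pyGetD_neg l k hkl, PySem.List.pyGetD_natCast, PySem.List.pySetD_natCast]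
      rw [pySetD_neg _ k (by simpa using hkl)]
      simp only [List.length_set, hlen, List.getD_eq_getElem?_getD, hlk, hlm,
        List.getElem?_eq_getElem hkn, List.getElem?_eq_getElem hm, Option.getD_some]
    rw [hswap]
    have hlen2 : ((l.set k r[r.length - 1 - k]).set (r.length - 1 - k) r[k]).length
        = r.length := by simp [hlen]
    refine ⟨hlen2, ?_⟩
    intro j hj
    by_cases h1 : r.length - 1 - k = j
    · subst h1
      rw [List.getElem?_set_self (by simp [hlen]; omega)]
      rw [if_pos (Or.inr (by omega))]
      rw [show r.length - 1 - (r.length - 1 - k) = k by omega]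
      rw [List.getElem?_eq_getElem hkn]
    · rw [List.getElem?_set_ne h1]
      by_cases h2 : k = j
      · subst h2
        rw [List.getElem?_set_self hkl]
        rw [if_pos (Or.inl (by omega))]
        rw [List.getElem?_eq_getElem hm]
      · rw [List.getElem?_set_ne h2, hget j hj]
        by_cases h3 : j < k ∨ r.length - k ≤ j
        · rw [if_pos h3, if_pos (by omega)]
        · rw [if_neg h3, if_neg (by omega)]

-- A's swap loop is list reversal
theorem swapfold_eq_reverse (r : List String) :
    (PySem.List.pyRange 0 (PySem.Int.floordiv (r.length : Int) 2) 1).foldl pySwapStep r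
      = r.reverse := by
  have hdiv : PySem.Int.floordiv (r.length : Int) 2 = ((r.length / 2 : Nat) : Int) := by
    exact_mod_cast PySem.Int.floordiv_natCast r.length 2
  rw [hdiv]
  obtain ⟨hlen, hget⟩ := swap_partial r (r.length / 2) (le_refl _)
  apply List.ext_getElem?
  intro j
  by_cases hj : j < r.length
  · rw [hget j hj, List.getElem?_reverse hj]
    by_cases h : j < r.length / 2 ∨ r.length - r.length / 2 ≤ j
    · rw [if_pos h]
    · rw [if_neg h, show r.length - 1 - j = j by omega]
  · rw [List.getElem?_eq_none (by rw [hlen]; omega),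
        List.getElem?_eq_none (by rw [List.length_reverse]; omega)]

-- the invariant of B's dict-building pass: distinct keys, strictly increasing positions, all below pos
def DictInv (d : PySem.Dict String Int) (pos : Int) : Prop :=
  (PySem.Dict.keys d).Nodup ∧ d.items.Pairwise (fun p q => p.2 < q.2) ∧ ∀ p ∈ d.items, p.2 < pos

-- B's setdefault pass over a flat element stream: the invariant is preserved and the dict's keys
-- are exactly what A's membership-scan/append pass produces from the same stream
theorem dict_fold_keys (xs : List String) :
    ∀ (d : PySem.Dict String Int) (pos : Int), DictInv d pos →
    DictInv (xs.foldl (fun st e => (PySem.Dict.setdefault st.1 e st.2, st.2 + 1)) (d, pos)).1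
            (xs.foldl (fun st e => (PySem.Dict.setdefault st.1 e st.2, st.2 + 1)) (d, pos)).2 ∧
    PySem.Dict.keys (xs.foldl (fun st e => (PySem.Dict.setdefault st.1 e st.2, st.2 + 1)) (d, pos)).1
      = xs.foldl (fun racc e => if e ∈ racc then racc else racc ++ [e]) (PySem.Dict.keys d) := by
  induction xs with
  | nil => intro d pos h; exact ⟨h, rfl⟩
  | cons x xs ih =>
    intro d pos h
    obtain ⟨hnd, hpw, hlt⟩ := h
    simp only [List.foldl_cons]
    by_cases hc : PySem.Dict.contains d x = true
    · have hmem : x ∈ PySem.Dict.keys d := (PySem.Dict.contains_iff_mem_keys d x).1 hc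
      rw [PySem.Dict.setdefault, if_pos hc, if_pos hmem]
      exact ih d (pos + 1) ⟨hnd, hpw, fun p hp => by have := hlt p hp; omega⟩
    · have hnmem : x ∉ PySem.Dict.keys d := fun hm =>
        hc ((PySem.Dict.contains_iff_mem_keys d x).2 hm)
      rw [PySem.Dict.setdefault, if_neg hc, if_neg hnmem]
      have hkeys : PySem.Dict.keys (⟨d.items ++ [(x, pos)]⟩ : PySem.Dict String Int)
          = PySem.Dict.keys d ++ [x] := by
        simp [PySem.Dict.keys]
      have hinv : DictInv (⟨d.items ++ [(x, pos)]⟩ : PySem.Dict String Int) (pos + 1) := by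
        refine ⟨?_, ?_, ?_⟩
        · rw [hkeys]
          exact List.Nodup.append hnd (List.nodup_singleton x)
            (by simpa using fun h' => hnmem h')
        · refine List.pairwise_append.2 ⟨hpw, List.pairwise_singleton _ _, ?_⟩
          intro p hp q hq
          simp only [List.mem_singleton] at hq
          subst hq
          exact hlt p hp
        · intro p hp
          rcases List.mem_append.1 hp with hp | hp
          · have := hlt p hp; omega
          · simp only [List.mem_singleton] at hp; subst hp; omega
      have := ih _ _ hinv
      rwa [hkeys] at this

-- given the invariant, sorting the keys by their stored position, descending, reverses the key list
theorem sorted_keys_desc (d : PySem.Dict String Int) (pos : Int) (h : DictInv d pos) :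
    PySem.List.sorted (PySem.Dict.keys d) (fun k => PySem.Dict.getD d k 0) true
      = (PySem.Dict.keys d).reverse := by
  obtain ⟨hnd, hpw, _⟩ := h
  apply PySem.List.sorted_rev_eq_of_perm_of_pairwise_gt
  · exact (PySem.Dict.keys d).reverse_perm
  · rw [List.pairwise_reverse]
    have hkpw : (PySem.Dict.keys d).Pairwise
        (fun a b => PySem.Dict.getD d a 0 < PySem.Dict.getD d b 0) := by
      unfold PySem.Dict.keys
      rw [List.pairwise_map]
      refine hpw.imp_of_mem ?_
      intro p q hp hq hlt
      rw [PySem.Dict.getD_of_mem_items d (by exact hp) hnd,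
          PySem.Dict.getD_of_mem_items d (by exact hq) hnd]
      exact hlt
    exact hkpw

-- ===== VERDICT =====
theorem custom_sort_reverse_spec : Claim_equal_custom_sort_reverse := by
  intro lst _
  unfold Spec_custom_sort_reverse custom_sort_reverse custom_sort_reverse_alt
  simp only []
  rw [swapfold_eq_reverse]
  -- turn both nested folds into folds over the same flattened stream
  have hA : (lst.map (fun sublist => pySortedSet sublist)).foldl
      (fun result sublist => sublist.foldl
        (fun result element => if element ∈ result then result else result ++ [element]) result) []
      = ((lst.map (fun sublist => pySortedSet sublist)).flatten).foldl
        (fun result element => if element ∈ result then result else result ++ [element]) [] := by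
    rw [List.foldl_flatten]
  have hB : lst.foldl
      (fun (st : PySem.Dict String Int × Int) sublist =>
        (pySortedSet sublist).foldl
          (fun st element => (PySem.Dict.setdefault st.1 element st.2, st.2 + 1)) st)
      (PySem.Dict.empty, 0)
      = ((lst.map (fun sublist => pySortedSet sublist)).flatten).foldl
        (fun st element => (PySem.Dict.setdefault st.1 element st.2, st.2 + 1))
        (PySem.Dict.empty, 0) := by
    rw [List.foldl_flatten, List.foldl_map]
  rw [hB]
  have h0 : DictInv PySem.Dict.empty 0 := by
    refine ⟨?_, ?_, ?_⟩ <;> simp [PySem.Dict.keys, PySem.Dict.empty]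
  obtain ⟨hinv, hkeys⟩ := dict_fold_keys ((lst.map (fun sublist => pySortedSet sublist)).flatten)
    PySem.Dict.empty 0 h0
  rw [sorted_keys_desc _ _ hinv, hkeys, hA]
  simp [PySem.Dict.empty, PySem.Dict.keys]
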